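-- pv_equiv track=rewrite | github.com/andylehti/shep32-streamlit | app.py | decodeShift
-- ===== SOURCE A (Python) =====
-- tDecCache = {}
--
-- gCharBase = "0123456789abcdefghijklmnopqrstuvwxyzABCDEFGHIJKLMNOPQRSTUVWXYZ.:;<>?@[]^&()*$%/\\`\"',_!#"
--
-- def deriveCharset(c): return gCharBase[:c]
--
-- def decodeShift(c, b):
--     s = str(c)
--     l = len(s)
--     if b == 10: return int(s) + ((10 ** l - 10) // 9 if l > 1 else 0)
--     if b == 16: return int(s, 16) + ((16 ** l - 16) // 15 if l > 1 else 0)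
--     if b not in tDecCache: tDecCache[b] = {ch: i for i, ch in enumerate(deriveCharset(b))}
--     charMap = tDecCache[b]
--     def evalRange(start, end):
--         if end - start <= 200:
--             res = 0
--             for i in range(start, end): res = res * b + charMap[s[i]]
--             return res
--         mid = (start + end) // 2
--         return evalRange(start, mid) * (b ** (end - mid)) + evalRange(mid, end)
--     v = evalRange(0, l)
--     geomSum = (b ** l - b) // (b - 1) if b > 1 and l > 1 else (l - 1 if b == 1 and l > 1 else 0)
--     return v + geomSum
-- ===== SOURCE B (Python) =====
-- tDecCache = {}
--
-- gCharBase = "0123456789abcdefghijklmnopqrstuvwxyzABCDEFGHIJKLMNOPQRSTUVWXYZ.:;<>?@[]^&()*$%/\\`\"',_!#"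
--
-- def decodeShift(c, b):
--     s = str(c)
--     l = len(s)
--     if b == 10: return int(s) + ((10 ** l - 10) // 9 if l > 1 else 0)
--     if b == 16: return int(s, 16) + ((16 ** l - 16) // 15 if l > 1 else 0)
--     if b not in tDecCache: tDecCache[b] = {ch: i for i, ch in enumerate(gCharBase[:b])}
--     charMap = tDecCache[b]
--     v = 0
--     for ch in s:
--         v = v * b + charMap[ch]
--     geomSum = (b ** l - b) // (b - 1) if b > 1 and l > 1 else (l - 1 if b == 1 and l > 1 else 0)
--     return v + geomSum
-- ===== Notes on version B (the rewrite author's own statement) =====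
-- stated objective: simpler
-- what changed: The balanced divide-and-conquer recursion evalRange (split range, recombine with b**(end-mid)) is replaced by a single flat Horner loop over the characters of s; the b==10/b==16 closed forms and the geomSum formula are kept verbatim.
import Mathlib
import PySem

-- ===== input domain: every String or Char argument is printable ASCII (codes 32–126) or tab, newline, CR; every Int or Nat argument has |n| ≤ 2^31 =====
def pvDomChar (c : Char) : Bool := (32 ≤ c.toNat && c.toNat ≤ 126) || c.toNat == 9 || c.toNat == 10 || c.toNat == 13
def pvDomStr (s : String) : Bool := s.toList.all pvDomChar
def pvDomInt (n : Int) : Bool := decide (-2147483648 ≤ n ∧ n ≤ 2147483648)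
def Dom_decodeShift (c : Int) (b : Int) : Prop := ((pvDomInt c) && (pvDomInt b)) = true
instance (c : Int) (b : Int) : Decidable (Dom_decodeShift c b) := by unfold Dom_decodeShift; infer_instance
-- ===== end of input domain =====

-- B replaces A's balanced divide-and-conquer evalRange recursion by a single flat Horner
-- loop over the characters of s (objective: simpler); the b=10/b=16 branches and geomSum
-- are kept verbatim. (A also caches charMap in a module-level dict tDecCache; that side
-- effect is not modelled — the ports rebuild the same dict, equivalence is about the
-- return value.)

-- ===== PORT A =====
def pvGCharBase : List Char :=
  "0123456789abcdefghijklmnopqrstuvwxyzABCDEFGHIJKLMNOPQRSTUVWXYZ.:;<>?@[]^&()*$%/\\`\"',_!#".toList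

-- deriveCharset(c) = gCharBase[:c]
def pvDeriveCharset (c : Int) : List Char := PySem.List.slice pvGCharBase none (some c)

-- {ch: i for i, ch in enumerate(deriveCharset(b))}  (the value tDecCache[b] always holds)
def pvCharMap (b : Int) : PySem.Dict Char Int :=
  PySem.Dict.ofList ((PySem.List.enumerate (pvDeriveCharset b) 0).map (fun p => (p.2, p.1)))

-- evalRange(start, end); charMap[s[i]] uses getD defaults — Pre_ keeps every looked-up
-- key in the dict and every index in range (Python raises KeyError otherwise)
def pvEvalRange (b : Int) (s : List Char) (m : PySem.Dict Char Int) (start en : Int) : Int :=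
  if en - start ≤ 200 then
    (PySem.List.pyRange start en 1).foldl
      (fun res i => res * b + m.getD (PySem.List.pyGetD s i ' ') 0) 0
  else
    let mid := PySem.Int.floordiv (start + en) 2
    pvEvalRange b s m start mid * b ^ (en - mid).toNat + pvEvalRange b s m mid en
  termination_by (en - start).toNat
  decreasing_by
  · simp only [PySem.Int.floordiv_eq_ediv_of_pos (by omega : (0:Int) < 2)] at *; omega
  · simp only [PySem.Int.floordiv_eq_ediv_of_pos (by omega : (0:Int) < 2)] at *; omega

def decodeShift (c : Int) (b : Int) : Int :=
  let s := PySem.Int.toChars c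
  let l : Int := (s.length : Int)
  -- int(str(c)) / int(str(c), 16) never raise, so .getD 0 is unreachable; b**l has l ≥ 0
  if b = 10 then (PySem.Int.ofChars? s).getD 0 + (if l > 1 then PySem.Int.floordiv (10 ^ l.toNat - 10) 9 else 0)
  else if b = 16 then (PySem.Int.ofCharsBase? s 16).getD 0 + (if l > 1 then PySem.Int.floordiv (16 ^ l.toNat - 16) 15 else 0)
  else
    let charMap := pvCharMap b
    let v := pvEvalRange b s charMap 0 l
    let geomSum := if b > 1 ∧ l > 1 then PySem.Int.floordiv (b ^ l.toNat - b) (b - 1)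
                   else if b = 1 ∧ l > 1 then l - 1 else 0
    v + geomSum

-- ===== PORT B =====
def decodeShift_alt (c : Int) (b : Int) : Int :=
  let s := PySem.Int.toChars c
  let l : Int := (s.length : Int)
  if b = 10 then (PySem.Int.ofChars? s).getD 0 + (if l > 1 then PySem.Int.floordiv (10 ^ l.toNat - 10) 9 else 0)
  else if b = 16 then (PySem.Int.ofCharsBase? s 16).getD 0 + (if l > 1 then PySem.Int.floordiv (16 ^ l.toNat - 16) 15 else 0)
  else
    let charMap := pvCharMap b
    -- flat Horner loop: for ch in s: v = v * b + charMap[ch]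
    let v := s.foldl (fun res ch => res * b + charMap.getD ch 0) 0
    let geomSum := if b > 1 ∧ l > 1 then PySem.Int.floordiv (b ^ l.toNat - b) (b - 1)
                   else if b = 1 ∧ l > 1 then l - 1 else 0
    v + geomSum

-- ===== PRECONDITION & SPEC =====
-- Exactly where Python A returns: for b ∉ {10, 16} the charMap lookup raises KeyError
-- on the '-' sign of a negative c and on any decimal digit d with d ≥ len(gCharBase[:b]).
def Pre_decodeShift (c : Int) (b : Int) : Prop :=
  b = 10 ∨ b = 16 ∨
    (0 ≤ c ∧ ((PySem.Int.toChars c).all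
      (fun ch => decide ((ch.toNat : Int) - 48 < (PySem.List.clampIdx 87 b : Int)))) = true)
instance (c : Int) (b : Int) : Decidable (Pre_decodeShift c b) := by
  unfold Pre_decodeShift; infer_instance
def pvWitness_decodeShift : Int × Int := (123, 5)

def Spec_decodeShift (c : Int) (b : Int) (out : Int) : Prop := out = decodeShift_alt c b
instance (c : Int) (b : Int) (out : Int) : Decidable (Spec_decodeShift c b out) := by
  unfold Spec_decodeShift; infer_instance

-- ===== CLAIM (what is proved, stated in full; the proofs are below) =====
def Claim_equal_decodeShift : Prop :=
  ∀ (c : Int) (b : Int), Dom_decodeShift c b → Pre_decodeShift c b →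
    Spec_decodeShift c b (decodeShift c b)

-- ===== LEMMAS AND PROOFS =====

-- Horner fold with an arbitrary initial accumulator factors as init·b^len + fold from 0.
theorem pvHorner_init {α : Type} (b : Int) (d : α → Int) (L : List α) (init : Int) :
    L.foldl (fun r x => r * b + d x) init
      = init * b ^ L.length + L.foldl (fun r x => r * b + d x) 0 := by
  induction L generalizing init with
  | nil => simp
  | cons x t ih =>
    simp only [List.foldl_cons, List.length_cons]
    rw [ih (init * b + d x), ih (0 * b + d x)]
    ring

-- A's divide-and-conquer evalRange computes the flat Horner fold over the index range.
theorem pvEvalRange_eq (b : Int) (s : List Char) (m : PySem.Dict Char Int)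
    (start en : Int) :
    pvEvalRange b s m start en
      = (PySem.List.pyRange start en 1).foldl
          (fun res i => res * b + m.getD (PySem.List.pyGetD s i ' ') 0) 0 := by
  fun_induction pvEvalRange b s m start en with
  | case1 start en h => rfl
  | case2 start en h mid ih1 ih2 =>
    have h2 : (0:Int) < 2 := by omega
    have hb1 : start ≤ mid := by
      simp only [mid, PySem.Int.floordiv_eq_ediv_of_pos h2]; omega
    have hb2 : mid ≤ en := by
      simp only [mid, PySem.Int.floordiv_eq_ediv_of_pos h2]; omega
    rw [ih1, ih2, PySem.List.pyRange_one_append start mid en hb1 hb2, List.foldl_append]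
    conv_rhs => rw [pvHorner_init]
    rw [PySem.List.length_pyRange_one]

-- ===== VERDICT (by name: the statement is the Claim_ definition above) =====
theorem decodeShift_spec : Claim_equal_decodeShift := by
  unfold Claim_equal_decodeShift
  intro c b _ _
  unfold Spec_decodeShift decodeShift decodeShift_alt
  by_cases h10 : b = 10
  · simp [h10]
  by_cases h16 : b = 16
  · simp [h16]
  simp only [if_neg h10, if_neg h16]
  rw [pvEvalRange_eq,
    PySem.List.foldl_pyRange_zero_pyGetD' (PySem.Int.toChars c) ' '
      (fun res ch => res * b + (pvCharMap b).getD ch 0) 0]
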